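-- pv_equiv track=rewrite | github.com/yanatan16/advent | 2022/day17/day17.py | land_rock
-- ===== SOURCE A (Python) =====
-- def land_rock(rock, tower, rock_level):
--     new_tower = tower
--     for i, row in enumerate(rock[::-1]):
--         level = rock_level + i
--         if len(tower) == level:
--             new_tower += [[False for _ in range(7)]]
--         new_tower[level] = [row[j] or tower[level][j] for j in range(7)]
--     return new_tower
-- ===== SOURCE B (Python) =====
-- def land_rock(rock, tower, rock_level):
--     # Build a level -> rock-row index once, then rebuild the tower in a single
--     # pass over ITS rows (dict lookup per row), appending the above-tower rock
--     # rows from the index at the end; finally splice the result back in place.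
--     at_level = {rock_level + i: row for i, row in enumerate(reversed(rock))}
--     out = []
--     for k, trow in enumerate(tower):
--         row = at_level.get(k)
--         if row is None:
--             out.append(trow)
--         else:
--             out.append([row[j] or trow[j] for j in range(7)])
--     for k, row in at_level.items():
--         if k >= len(tower):
--             out.append([row[j] for j in range(7)])
--     tower[:] = out
--     return tower
-- ===== Notes on version B (the rewrite author's own statement) =====
-- stated objective: alternative
-- what changed: A loops over the rock's rows, mutating the tower per level (conditional blank-row append, then index assignment that reads the row it merges into); B builds a level-to-rock-row dictionary once, rebuilds the tower in a single pass over ITS rows with a dict lookup per row, then appends the above-tower rows while iterating the dict's items.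
import Mathlib
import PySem

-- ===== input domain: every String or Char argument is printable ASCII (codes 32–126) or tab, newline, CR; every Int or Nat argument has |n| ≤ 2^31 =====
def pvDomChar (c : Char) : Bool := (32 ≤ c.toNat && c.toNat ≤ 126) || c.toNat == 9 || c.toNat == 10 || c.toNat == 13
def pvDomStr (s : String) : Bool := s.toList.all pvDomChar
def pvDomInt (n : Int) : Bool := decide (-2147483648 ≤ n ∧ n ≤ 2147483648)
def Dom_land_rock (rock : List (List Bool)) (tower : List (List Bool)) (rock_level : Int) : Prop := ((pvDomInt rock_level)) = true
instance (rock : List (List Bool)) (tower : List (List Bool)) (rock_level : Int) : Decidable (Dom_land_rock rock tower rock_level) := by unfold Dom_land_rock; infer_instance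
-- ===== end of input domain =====

-- land_rock: merge a rock shape into the tower at rock_level.
-- B replaces A's loop over the rock (conditional append + per-level index
-- assignment) by a level->rock-row dictionary built once and ONE pass over the
-- tower's rows (dict lookup per row) plus appending the above-tower rows from
-- the dict; same return value, and B splices the result back in place like A
-- (equivalence proved here is about the return value).


-- ===== PORT A =====
-- the for-loop over enumerate(rock[::-1]) as structural recursion; `level` carries
-- rock_level + i.  pyGetD/pySetD are exact on Pre_ (indices in range there).
def landGoA (rows : List (List Bool)) (nt : List (List Bool)) (level : Int) : List (List Bool) :=
  match rows with
  | [] => nt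
  | row :: rest =>
    let nt1 := if (nt.length : Int) = level then nt ++ [List.replicate 7 false] else nt
    let merged := (PySem.List.pyRange 0 7 1).map (fun j =>
      PySem.List.pyGetD row j false || PySem.List.pyGetD (PySem.List.pyGetD nt1 level []) j false)
    landGoA rest (PySem.List.pySetD nt1 level merged) (level + 1)

def land_rock (rock : List (List Bool)) (tower : List (List Bool)) (rock_level : Int) : List (List Bool) :=
  landGoA rock.reverse tower rock_level   -- rock[::-1] is rock.reverse

-- ===== PORT B =====
-- Source B: at_level = {rock_level+i: row for i, row in enumerate(reversed(rock))}
def atLevel (rev : List (List Bool)) (n : Int) : PySem.Dict Int (List Bool) :=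
  (PySem.List.enumerate rev).foldl (fun d p => d.insert (n + p.1) p.2) PySem.Dict.empty

-- the first loop: for k, trow in enumerate(tower): dict lookup, merge or keep
def bMergePass (d : PySem.Dict Int (List Bool)) (tower : List (List Bool)) : List (List Bool) :=
  (PySem.List.enumerate tower).foldl (fun acc p =>
    match d.get? p.1 with
    | none => acc ++ [p.2]
    | some row => acc ++ [(PySem.List.pyRange 0 7 1).map (fun j =>
        PySem.List.pyGetD row j false || PySem.List.pyGetD p.2 j false)]) []

-- the second loop: for k, row in at_level.items(): append [row[j] for j in range(7)] if k >= len(tower)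
def bAppendAbove (d : PySem.Dict Int (List Bool)) (m : Int) (out : List (List Bool)) : List (List Bool) :=
  d.items.foldl (fun acc p =>
    if m ≤ p.1 then
      acc ++ [(PySem.List.pyRange 0 7 1).map (fun j => PySem.List.pyGetD p.2 j false)]
    else acc) out

-- tower[:] = out; return tower  — the return value is out's rows
def land_rock_alt (rock : List (List Bool)) (tower : List (List Bool)) (rock_level : Int) : List (List Bool) :=
  bAppendAbove (atLevel rock.reverse rock_level) (tower.length : Int)
    (bMergePass (atLevel rock.reverse rock_level) tower)

-- ===== PRECONDITION & SPEC =====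
-- Pre_ is exactly where the Python A returns normally, except one deliberately
-- excluded corner (cite in claim.json): negative rock_level, where A's value comes
-- from Python's negative-index wraparound and B's value is as defensible.
-- Inside: empty rock (no-op at any level), or the rock lands at or below the tower
-- top, rock rows are at least 7 wide, and wherever a rock cell is False the tower
-- cell under it exists (A reads it; a True rock cell short-circuits the `or`).
def Pre_land_rock (rock : List (List Bool)) (tower : List (List Bool)) (rock_level : Int) : Prop :=
  rock = [] ∨
  (0 ≤ rock_level ∧ rock_level ≤ (tower.length : Int) ∧
   (∀ r ∈ rock, 7 ≤ r.length) ∧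
   (∀ i < rock.length, ∀ j < 7,
     (rock.reverse.getD i []).getD j false = true ∨
       j < ((tower.drop rock_level.toNat).getD i (List.replicate 7 false)).length))
instance (rock : List (List Bool)) (tower : List (List Bool)) (rock_level : Int) : Decidable (Pre_land_rock rock tower rock_level) := by unfold Pre_land_rock; infer_instance

def pvWitness_land_rock : List (List Bool) × List (List Bool) × Int :=
  ([[true, true, true, true, false, false, false]],
   [[true, false, false, false, false, false, true]], 0)

def Spec_land_rock (rock : List (List Bool)) (tower : List (List Bool)) (rock_level : Int) (out : List (List Bool)) : Prop := out = land_rock_alt rock tower rock_level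
instance (rock : List (List Bool)) (tower : List (List Bool)) (rock_level : Int) (out : List (List Bool)) : Decidable (Spec_land_rock rock tower rock_level out) := by unfold Spec_land_rock; infer_instance

-- ===== CLAIM (what is proved, stated in full; the proofs are below) =====
def Claim_equal_land_rock : Prop := ∀ (rock : List (List Bool)) (tower : List (List Bool)) (rock_level : Int), Dom_land_rock rock tower rock_level → Pre_land_rock rock tower rock_level → Spec_land_rock rock tower rock_level (land_rock rock tower rock_level)

-- ===== LEMMAS AND PROOFS =====

-- the common description of the result: rows n .. n+k-1 replaced by the merge.
def blankRow : List Bool := List.replicate 7 false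
def towRow (tower : List (List Bool)) (m : Nat) : List Bool := tower.getD m blankRow
def mrow (r t : List Bool) : List Bool :=
  (PySem.List.pyRange 0 7 1).map (fun j =>
    PySem.List.pyGetD r j false || PySem.List.pyGetD t j false)
def bRow (r : List Bool) : List Bool :=
  (PySem.List.pyRange 0 7 1).map (fun j => PySem.List.pyGetD r j false)

lemma towRow_oor (tower : List (List Bool)) (m : Nat) (h : tower.length ≤ m) :
    towRow tower m = blankRow := by
  simp [towRow, List.getD, List.getElem?_eq_none h]

lemma towRow_ir (tower : List (List Bool)) (m : Nat) (h : m < tower.length) :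
    towRow tower m = tower[m] := by
  simp [towRow, List.getD_eq_getElem?_getD, List.getElem?_eq_getElem h]

lemma goA_formula (rev : List (List Bool)) : ∀ (tower : List (List Bool)) (n : Nat), n ≤ tower.length →
    landGoA rev tower (n : Int) =
      tower.take n
        ++ (List.range rev.length).map (fun i => mrow (rev.getD i []) (towRow tower (n + i)))
        ++ tower.drop (n + rev.length) := by
  induction rev with
  | nil => intro tower n h; simp [landGoA]
  | cons row rest ih =>
    intro tower n h
    rw [landGoA]
    by_cases hc : tower.length = n
    · have hif : ((tower.length : Int) = (n : Int)) := by exact_mod_cast hc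
      simp only [hif, ite_true]
      have hget : PySem.List.pyGetD (tower ++ [List.replicate 7 false]) ((n:Nat) : Int) ([] : List Bool)
          = blankRow := by
        simp [PySem.List.pyGetD_natCast, List.getD, hc, blankRow]
      have hm : (PySem.List.pyRange 0 7 1).map (fun j =>
            PySem.List.pyGetD row j false ||
            PySem.List.pyGetD (PySem.List.pyGetD (tower ++ [List.replicate 7 false]) ((n:Nat):Int) []) j false)
          = mrow row (towRow tower n) := by
        rw [hget, mrow, towRow_oor tower n (le_of_eq hc)]
      rw [hm]
      have hset : PySem.List.pySetD (tower ++ [List.replicate 7 false]) ((n:Nat) : Int)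
            (mrow row (towRow tower n)) = tower ++ [mrow row (towRow tower n)] := by
        rw [PySem.List.pySetD_natCast]
        simp [hc]
      rw [hset]
      have hcast : ((n : Int) + 1) = (((n+1 : Nat)) : Int) := by push_cast; ring
      rw [hcast, ih (tower ++ [mrow row (towRow tower n)]) (n+1) (by simp [hc])]
      simp only [List.length_cons, List.range_succ_eq_map]
      simp only [List.map_cons, List.map_map]
      have e1 : (tower ++ [mrow row (towRow tower n)]).take (n+1)
          = tower ++ [mrow row (towRow tower n)] := List.take_of_length_le (by simp [hc])
      have e2 : (tower ++ [mrow row (towRow tower n)]).drop (n+1+rest.length)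
          = tower.drop (n + (rest.length+1)) := by
        rw [List.drop_eq_nil_of_le (by simp [hc]), List.drop_eq_nil_of_le (by omega)]
      have e3 : ∀ i : Nat, towRow (tower ++ [mrow row (towRow tower n)]) (n+1+i) = towRow tower (n + (i+1)) := by
        intro i
        rw [towRow_oor _ _ (by simp [hc]), towRow_oor _ _ (by omega)]
      have e4 : tower.take n = tower := List.take_of_length_le (by omega)
      simp only [e1, e2, e3, e4]
      simp [Function.comp_def]
    · have hlt : n < tower.length := lt_of_le_of_ne h (fun e => hc e.symm)
      have hif : ¬ ((tower.length : Int) = (n : Int)) := by exact_mod_cast hc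
      simp only [if_neg hif]
      have hget : PySem.List.pyGetD tower ((n:Nat) : Int) ([] : List Bool) = towRow tower n := by
        simp [PySem.List.pyGetD_natCast, List.getD, List.getElem?_eq_getElem hlt,
              towRow_ir tower n hlt]
      have hm : (PySem.List.pyRange 0 7 1).map (fun j =>
            PySem.List.pyGetD row j false ||
            PySem.List.pyGetD (PySem.List.pyGetD tower ((n:Nat):Int) []) j false)
          = mrow row (towRow tower n) := by
        rw [hget, mrow]
      rw [hm]
      have hset : PySem.List.pySetD tower ((n:Nat) : Int) (mrow row (towRow tower n))
          = tower.set n (mrow row (towRow tower n)) := PySem.List.pySetD_natCast tower n _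
      rw [hset]
      have hcast : ((n : Int) + 1) = (((n+1 : Nat)) : Int) := by push_cast; ring
      rw [hcast, ih (tower.set n (mrow row (towRow tower n))) (n+1) (by simp; omega)]
      simp only [List.length_cons, List.range_succ_eq_map]
      have e1 : (tower.set n (mrow row (towRow tower n))).take (n+1)
          = tower.take n ++ [mrow row (towRow tower n)] := by
        rw [List.set_eq_take_cons_drop _ hlt, List.take_append]
        simp [List.length_take, Nat.min_eq_left (Nat.le_of_lt hlt)]
      have e2 : (tower.set n (mrow row (towRow tower n))).drop (n+1+rest.length)
          = tower.drop (n + (rest.length+1)) := by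
        rw [List.drop_set_of_lt (by omega)]
        congr 1
        omega
      have e3 : ∀ i : Nat, towRow (tower.set n (mrow row (towRow tower n))) (n+1+i)
          = towRow tower (n + (i+1)) := by
        intro i
        have hne : n ≠ n+1+i := by omega
        have hidx : n+1+i = n + (i+1) := by omega
        rw [towRow, List.getD, List.getElem?_set_ne hne, hidx, towRow, List.getD]
      simp only [e1, e2, e3, List.map_cons, List.map_map]
      simp [Function.comp_def]

-- ---- B-side lemmas ----

lemma atLevel_items (rev : List (List Bool)) (n : Int) :
    (atLevel rev n).items = (PySem.List.enumerate rev).map (fun p => (n + p.1, p.2)) := by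
  have h := PySem.Dict.items_foldl_insert_fresh (PySem.List.enumerate rev)
      (fun p => n + p.1) (fun p => p.2) PySem.Dict.empty
      (fun a _ => PySem.Dict.contains_empty _)
      (by
        have h0 := PySem.List.pairwise_lt_enumerate rev 0
        have h1 : ((PySem.List.enumerate rev).map (fun p => n + p.1)).Pairwise (· < ·) :=
          List.Pairwise.map _ (fun hab => by omega) h0
        exact List.Pairwise.imp (fun hab => ne_of_lt hab) h1)
  simpa [atLevel] using h

lemma atLevel_keys_nodup (rev : List (List Bool)) (n : Int) : (atLevel rev n).keys.Nodup := by
  exact PySem.Dict.nodup_keys_foldl_insert_key (PySem.List.enumerate rev)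
    (fun p => n + p.1) (fun _ p => p.2) PySem.Dict.empty
    PySem.Dict.nodup_keys_empty

lemma atLevel_get? (rev : List (List Bool)) (n : Int) (k : Int) :
    (atLevel rev n).get? k =
      if n ≤ k ∧ k < n + rev.length then some (rev.getD (k - n).toNat []) else none := by
  split_ifs with hin
  · have hlt : (k - n).toNat < rev.length := by omega
    apply PySem.Dict.get?_of_mem_items _ _ (atLevel_keys_nodup rev n)
    rw [atLevel_items]
    refine List.mem_map.mpr ⟨((((k - n).toNat : Nat) : Int), rev[(k - n).toNat]'hlt), ?_, ?_⟩
    · rw [PySem.List.mem_enumerate_iff]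
      exact ⟨(k - n).toNat, hlt, by simp⟩
    · simp only [Prod.mk.injEq]
      refine ⟨by omega, ?_⟩
      rw [List.getD_eq_getElem rev [] hlt]
  · rw [PySem.Dict.get?_eq_none_iff_not_mem_keys]
    intro hk
    have hk2 : k ∈ (atLevel rev n).items.map (·.1) := hk
    rw [atLevel_items, List.map_map] at hk2
    rcases List.mem_map.mp hk2 with ⟨p, hp, hpk⟩
    rcases (PySem.List.mem_enumerate_iff rev 0 p).mp hp with ⟨i, hi, rfl⟩
    simp at hpk
    omega

-- a fold that only appends is a map
lemma foldl_append_map {α β : Type} (l : List α) (g : α → β) :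
    ∀ acc : List β, l.foldl (fun a x => a ++ [g x]) acc = acc ++ l.map g := by
  induction l with
  | nil => intro acc; simp
  | cons x xs ih => intro acc; simp [ih, List.foldl_cons]

-- a per-row view of B's first pass
def hMerge (rev : List (List Bool)) (n : Int) (p : Int × List Bool) : List Bool :=
  if n ≤ p.1 ∧ p.1 < n + rev.length then mrow (rev.getD (p.1 - n).toNat []) p.2 else p.2

lemma mergePass_eq (rev : List (List Bool)) (n : Int) (tower : List (List Bool)) :
    bMergePass (atLevel rev n) tower = (PySem.List.enumerate tower).map (hMerge rev n) := by
  unfold bMergePass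
  have hfn : (fun (acc : List (List Bool)) (p : Int × List Bool) =>
      match (atLevel rev n).get? p.1 with
      | none => acc ++ [p.2]
      | some row => acc ++ [(PySem.List.pyRange 0 7 1).map (fun j =>
          PySem.List.pyGetD row j false || PySem.List.pyGetD p.2 j false)])
      = (fun acc p => acc ++ [hMerge rev n p]) := by
    funext acc p
    rw [atLevel_get? rev n p.1]
    unfold hMerge
    split_ifs <;> rfl
  rw [hfn, foldl_append_map]
  simp

-- the tail pass over items (increasing keys n, n+1, …): kept rows are a drop
lemma tailGo (m n : Nat) (rev : List (List Bool)) :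
    ∀ (b : Nat) (acc : List (List Bool)),
    (PySem.List.enumerate rev ((b : Nat) : Int)).foldl
        (fun acc p => if (m : Int) ≤ (n : Int) + p.1 then acc ++ [bRow p.2] else acc) acc
      = acc ++ (rev.drop (m - n - b)).map bRow := by
  induction rev with
  | nil => intro b acc; simp [PySem.List.enumerate_nil]
  | cons r rest ih =>
    intro b acc
    rw [PySem.List.enumerate_cons, List.foldl_cons]
    by_cases hc : m ≤ n + b
    · rw [if_pos (by push_cast; omega)]
      have hcast : (((b : Nat) : Int) + 1) = (((b + 1 : Nat)) : Int) := by push_cast; ring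
      rw [hcast, ih (b + 1) (acc ++ [bRow r])]
      have h1 : m - n - b = 0 := by omega
      have h2 : m - n - (b + 1) = 0 := by omega
      simp [h1, h2]
    · rw [if_neg (by push_cast; omega)]
      have hcast : (((b : Nat) : Int) + 1) = (((b + 1 : Nat)) : Int) := by push_cast; ring
      rw [hcast, ih (b + 1) acc]
      have h1 : m - n - b = (m - n - (b + 1)) + 1 := by omega
      rw [h1, List.drop_succ_cons]

lemma appendAbove_eq (rev : List (List Bool)) (n m : Nat) (out : List (List Bool)) :
    bAppendAbove (atLevel rev (n : Int)) (m : Int) out = out ++ (rev.drop (m - n)).map bRow := by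
  unfold bAppendAbove
  rw [atLevel_items, List.foldl_map]
  exact tailGo m n rev 0 out

lemma pyGetD_blank (j : Int) : PySem.List.pyGetD blankRow j false = false := by
  unfold PySem.List.pyGetD blankRow
  cases h : PySem.List.pyGet? (List.replicate 7 false) j with
  | none => rfl
  | some b =>
    have hb : b ∈ List.replicate 7 false := PySem.List.mem_of_pyGet?_eq_some _ h
    simp at hb
    simp [hb]

lemma mrow_blank (r : List Bool) : mrow r blankRow = bRow r := by
  unfold mrow bRow
  refine List.map_congr_left (fun j _ => ?_)
  rw [pyGetD_blank, Bool.or_false]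

-- B's value in closed form (same formula as goA_formula's right-hand side)
lemma alt_formula (rock tower : List (List Bool)) (n : Nat) (hn : n ≤ tower.length) :
    land_rock_alt rock tower (n : Int) =
      tower.take n
        ++ (List.range rock.reverse.length).map
            (fun i => mrow (rock.reverse.getD i []) (towRow tower (n + i)))
        ++ tower.drop (n + rock.reverse.length) := by
  have hstep : land_rock_alt rock tower (n : Int)
      = (PySem.List.enumerate tower).map (hMerge rock.reverse n)
        ++ (rock.reverse.drop (tower.length - n)).map bRow := by
    unfold land_rock_alt
    rw [mergePass_eq, appendAbove_eq]
  rw [hstep]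
  set rev := rock.reverse with hrev
  set L := rev.length with hL
  set m := tower.length with hm
  apply List.ext_getElem
  · simp only [List.length_append, List.length_map, PySem.List.length_enumerate,
      List.length_take, List.length_drop, List.length_range, ← hm, ← hL]
    omega
  · intro t h1 h2
    by_cases ht : t < m
    · have hM : t < ((PySem.List.enumerate tower).map (hMerge rev (n : Int))).length := by
        simp [PySem.List.length_enumerate, ← hm]; omega
      rw [List.getElem_append_left hM, List.getElem_map, PySem.List.getElem_enumerate]
      unfold hMerge
      by_cases hmid : n ≤ t ∧ t < n + L
      · rw [if_pos (by constructor <;> [omega; (push_cast; omega)])]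
        have hidx : (((0 : Int) + (t : Int)) - (n : Int)).toNat = t - n := by omega
        rw [hidx]
        have hA1 : t < (tower.take n ++ (List.range L).map
            (fun i => mrow (rev.getD i []) (towRow tower (n + i)))).length := by
          simp [List.length_take, ← hm]; omega
        rw [List.getElem_append_left hA1,
            List.getElem_append_right (by simp [List.length_take, ← hm]; omega),
            List.getElem_map, List.getElem_range]
        have htk : (tower.take n).length = n := by simp [List.length_take, ← hm]; omega
        have hidx2 : n + (t - (tower.take n).length) = t := by rw [htk]; omega
        rw [hidx2]
        have hidx3 : t - (tower.take n).length = t - n := by rw [htk]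
        rw [hidx3, towRow_ir tower t (by omega)]
      · rw [if_neg (by
          intro hcon
          rcases hcon with ⟨ha, hb⟩
          apply hmid
          constructor <;> omega)]
        by_cases htn : t < n
        · have hA1 : t < (tower.take n ++ (List.range L).map
              (fun i => mrow (rev.getD i []) (towRow tower (n + i)))).length := by
            simp [List.length_take, ← hm]; omega
          rw [List.getElem_append_left hA1,
              List.getElem_append_left (by simp [List.length_take, ← hm]; omega),
              List.getElem_take]
        · have hge : n + L ≤ t := by omega
          have hA12len : (tower.take n ++ (List.range L).map
              (fun i => mrow (rev.getD i []) (towRow tower (n + i)))).length = n + L := by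
            simp [List.length_take, ← hm]; omega
          rw [List.getElem_append_right (by rw [hA12len]; omega), List.getElem_drop]
          show tower[t] = _
          simp only [hA12len]
          congr 1
          omega
    · -- above the tower: the tail rows
      have hMlen : ((PySem.List.enumerate tower).map (hMerge rev (n : Int))).length = m := by
        simp [PySem.List.length_enumerate, ← hm]
      have hTlen : t < m + (L - (m - n)) := by
        simpa [List.length_append, List.length_map, PySem.List.length_enumerate,
          List.length_drop, ← hm, ← hL] using h1
      have htL : t < n + L := by omega
      rw [List.getElem_append_right (by rw [hMlen]; omega), List.getElem_map, List.getElem_drop]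
      have hA1 : t < (tower.take n ++ (List.range L).map
          (fun i => mrow (rev.getD i []) (towRow tower (n + i)))).length := by
        simp [List.length_take, ← hm]; omega
      rw [List.getElem_append_left hA1,
          List.getElem_append_right (by simp [List.length_take, ← hm]; omega),
          List.getElem_map, List.getElem_range]
      have htk : (tower.take n).length = n := by simp [List.length_take, ← hm]; omega
      have hmn : n + (t - (tower.take n).length) = t := by rw [htk]; omega
      rw [hmn, towRow_oor tower t (by omega), mrow_blank]
      congr 1
      have hlt2 : t - (tower.take n).length < L := by rw [htk]; omega
      rw [List.getD_eq_getElem rev [] hlt2]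
      congr 1
      rw [hMlen, htk]
      omega

lemma alt_nil_all (tower : List (List Bool)) (rock_level : Int) :
    land_rock_alt [] tower rock_level = tower := by
  unfold land_rock_alt
  rw [mergePass_eq]
  unfold bAppendAbove
  rw [atLevel_items]
  simp only [List.reverse_nil, PySem.List.enumerate_nil, List.map_nil, List.foldl_nil]
  have : ∀ p ∈ PySem.List.enumerate tower, hMerge [] rock_level p = p.2 := by
    intro p _
    unfold hMerge
    rw [if_neg (by simp)]
  rw [List.map_congr_left this]
  exact PySem.List.map_snd_enumerate tower 0

-- ===== VERDICT (by name: the statement is the Claim_ definition above) =====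
theorem land_rock_spec : Claim_equal_land_rock := by
  intro rock tower rock_level _hdom hpre
  rcases hpre with hnil | ⟨h0, hle, -, -⟩
  · subst hnil
    unfold Spec_land_rock land_rock
    rw [alt_nil_all, List.reverse_nil, landGoA]
  have hn : rock_level = ((rock_level.toNat : Nat) : Int) := (Int.toNat_of_nonneg h0).symm
  unfold Spec_land_rock land_rock
  rw [hn]
  rw [goA_formula rock.reverse tower rock_level.toNat (by omega),
      alt_formula rock tower rock_level.toNat (by omega)]
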